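-- pv_equiv track=rewrite | github.com/Pr0kythera/NavToGen | validators/security_validator.py | is_safe_for_logging
-- ===== SOURCE A (Python) =====
-- def is_safe_for_logging(text: str, max_length: int = 500) -> str:
--     """
--     Sanitize text for safe inclusion in log messages.
--
--     Log injection attacks can occur when user-controlled data is written to
--     logs without proper sanitization. This method ensures log messages are safe.
--
--     Args:
--         text: Text to include in logs
--         max_length: Maximum length to prevent log bloat
--
--     Returns:
--         str: Sanitized text safe for logging
--     """
--     if not text or not isinstance(text, str):
--         return "[invalid input]"
--
--     # Remove potentially dangerous characters
--     # Newlines and carriage returns can be used for log injection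
--     sanitized = text.replace('\n', '\\n').replace('\r', '\\r').replace('\t', '\\t')
--
--     # Remove other control characters
--     sanitized = ''.join(char for char in sanitized if ord(char) >= 32 or char in '\t')
--
--     # Limit length to prevent log spam
--     if len(sanitized) > max_length:
--         sanitized = sanitized[:max_length] + "[truncated]"
--
--     return sanitized
-- ===== SOURCE B (Python) =====
-- _ESC = {'\n': '\\n', '\r': '\\r', '\t': '\\t'}
--
-- def is_safe_for_logging(text: str, max_length: int = 500) -> str:
--     """Single-pass sanitizer: one char-to-fragment map instead of three
--     chained replaces plus a filtering comprehension."""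
--     if not text or not isinstance(text, str):
--         return "[invalid input]"
--     parts = []
--     for ch in text:
--         if ch in _ESC:
--             parts.append(_ESC[ch])
--         elif ord(ch) >= 32:
--             parts.append(ch)
--     sanitized = ''.join(parts)
--     if len(sanitized) > max_length:
--         sanitized = sanitized[:max_length] + "[truncated]"
--     return sanitized
-- ===== Notes on version B (the rewrite author's own statement) =====
-- stated objective: alternative
-- what changed: Replaces the three chained str.replace passes plus a filtering join-comprehension with a single pass that maps each character through one escape table (escape \n/\r/\t, keep printables, drop other controls) and joins once.
import Mathlib
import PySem

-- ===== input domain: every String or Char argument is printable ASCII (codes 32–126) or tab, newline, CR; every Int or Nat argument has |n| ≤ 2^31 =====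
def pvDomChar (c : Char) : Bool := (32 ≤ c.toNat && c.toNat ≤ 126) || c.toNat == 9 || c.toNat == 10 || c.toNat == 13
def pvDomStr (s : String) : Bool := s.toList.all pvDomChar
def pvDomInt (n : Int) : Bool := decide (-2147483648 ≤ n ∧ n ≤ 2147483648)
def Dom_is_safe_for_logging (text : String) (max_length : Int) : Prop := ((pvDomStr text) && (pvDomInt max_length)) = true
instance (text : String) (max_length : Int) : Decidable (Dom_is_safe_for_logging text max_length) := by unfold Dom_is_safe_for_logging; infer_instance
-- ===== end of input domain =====

-- B replaces A's three chained replace passes + filtering comprehension with a single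
-- table-driven pass over the characters; return values proved equal on the domain.

-- ===== PORT A =====
def is_safe_for_logging (text : String) (max_length : Int) : String :=
  if text.toList = [] then "[invalid input]"
  else
    let s1 := PySem.Chars.replace text.toList ['\n'] ['\\', 'n']
    let s2 := PySem.Chars.replace s1 ['\r'] ['\\', 'r']
    let s3 := PySem.Chars.replace s2 ['\t'] ['\\', 't']
    let sanitized := s3.filter (fun c => decide (32 ≤ c.toNat) || c == '\t')
    if max_length < (sanitized.length : Int) then
      String.ofList (PySem.List.slice sanitized none (some max_length) ++ "[truncated]".toList)
    else
      String.ofList sanitized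

-- ===== PORT B =====
-- the escape table of Source B, as one char-to-fragment function
def pvEsc (c : Char) : List Char :=
  if c == '\n' then ['\\', 'n']
  else if c == '\r' then ['\\', 'r']
  else if c == '\t' then ['\\', 't']
  else if decide (32 ≤ c.toNat) then [c] else []

def is_safe_for_logging_alt (text : String) (max_length : Int) : String :=
  if text.toList = [] then "[invalid input]"
  else
    let sanitized := text.toList.flatMap pvEsc
    if max_length < (sanitized.length : Int) then
      String.ofList (PySem.List.slice sanitized none (some max_length) ++ "[truncated]".toList)
    else
      String.ofList sanitized

-- ===== PRECONDITION & SPEC =====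
def Spec_is_safe_for_logging (text : String) (max_length : Int) (out : String) : Prop := out = is_safe_for_logging_alt text max_length
instance (text : String) (max_length : Int) (out : String) : Decidable (Spec_is_safe_for_logging text max_length out) := by unfold Spec_is_safe_for_logging; infer_instance

-- ===== CLAIM (what is proved, stated in full; the proofs are below) =====
def Claim_equal_is_safe_for_logging : Prop := ∀ (text : String) (max_length : Int), Dom_is_safe_for_logging text max_length → Spec_is_safe_for_logging text max_length (is_safe_for_logging text max_length)

-- ===== LEMMAS AND PROOFS =====

lemma char_eq_of_toNat {c d : Char} (h : c.toNat = d.toNat) : c = d :=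
  Char.ext (UInt32.toNat_inj.mp h)

-- replace.go with a single-char pattern is a per-char flatMap
lemma replace_go_singleton (a : Char) (new : List Char) :
    ∀ (fuel : Nat) (l acc : List Char), l.length ≤ fuel →
      PySem.Chars.replace.go [a] new fuel l acc
        = acc.reverse ++ l.flatMap (fun c => if c = a then new else [c]) := by
  intro fuel
  induction fuel with
  | zero =>
    intro l acc h
    have : l = [] := List.eq_nil_of_length_eq_zero (Nat.le_zero.mp h)
    subst this
    simp [PySem.Chars.replace.go]
  | succ n ih =>
    intro l acc h
    cases l with
    | nil => simp [PySem.Chars.replace.go]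
    | cons c t =>
      simp only [PySem.Chars.replace.go]
      by_cases hc : c = a
      · subst hc
        have hp : [c].isPrefixOf (c :: t) = true := by simp [List.isPrefixOf]
        rw [hp]
        simp only [if_true, List.length_cons] at *
        simp only [List.length_nil, List.drop_succ_cons, List.drop_zero]
        rw [ih t (new.reverse ++ acc) (by simpa using Nat.le_of_succ_le_succ h)]
        simp [List.flatMap_cons]
      · have hp : [a].isPrefixOf (c :: t) = false := by
          simp [List.isPrefixOf]
          intro he; exact absurd he.symm hc
        rw [hp]
        simp only [Bool.false_eq_true, if_false]
        rw [ih t (c :: acc) (by simpa using Nat.le_of_succ_le_succ h)]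
        simp [List.flatMap_cons, hc]

lemma replace_singleton (s : List Char) (a : Char) (new : List Char) :
    PySem.Chars.replace s [a] new = s.flatMap (fun c => if c = a then new else [c]) := by
  unfold PySem.Chars.replace
  simp only [List.isEmpty_cons, Bool.false_eq_true, if_false]
  exact replace_go_singleton a new s.length s [] (le_refl _)

-- A's whole sanitizing pipeline equals B's one-pass flatMap, for domain characters
lemma pipeline_eq (cs : List Char) (h : cs.all pvDomChar = true) :
    (PySem.Chars.replace
        (PySem.Chars.replace
          (PySem.Chars.replace cs ['\n'] ['\\', 'n'])
          ['\r'] ['\\', 'r'])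
        ['\t'] ['\\', 't']).filter (fun c => decide (32 ≤ c.toNat) || c == '\t')
      = cs.flatMap pvEsc := by
  induction cs with
  | nil => simp [replace_singleton]
  | cons c t iht =>
    simp only [List.all_cons, Bool.and_eq_true] at h
    have ht := iht h.2
    simp only [replace_singleton] at ht ⊢
    simp only [List.flatMap_cons, List.flatMap_append, List.filter_append]
    rw [ht]
    congr 1
    have hd := h.1
    by_cases h1 : c = '\n'
    · subst h1; decide
    · by_cases h2 : c = '\r'
      · subst h2; decide
      · by_cases h3 : c = '\t'
        · subst h3; decide
        · have h32 : 32 ≤ c.toNat := by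
            have h9 : c.toNat ≠ 9 := fun h' => h3 (char_eq_of_toNat h')
            have h10 : c.toNat ≠ 10 := fun h' => h1 (char_eq_of_toNat h')
            have h13 : c.toNat ≠ 13 := fun h' => h2 (char_eq_of_toNat h')
            simp only [pvDomChar, Bool.or_eq_true, Bool.and_eq_true, decide_eq_true_eq,
              beq_iff_eq] at hd
            omega
          simp [pvEsc, h1, h2, h3, h32, beq_iff_eq]

-- ===== VERDICT (by name: the statement is the Claim_ definition above) =====
theorem is_safe_for_logging_spec : Claim_equal_is_safe_for_logging := by
  intro text max_length hdom
  unfold Spec_is_safe_for_logging is_safe_for_logging is_safe_for_logging_alt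
  by_cases he : text.toList = []
  · simp [he]
  · simp only [he, if_false]
    have hall : text.toList.all pvDomChar = true := by
      simp only [Dom_is_safe_for_logging, Bool.and_eq_true, pvDomStr] at hdom
      exact hdom.1
    rw [pipeline_eq text.toList hall]
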